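-- pv_equiv track=rewrite | github.com/WhatNextAlgo/LeetCode | BinarySearch/Easy/744. Find Smallest Letter Greater Than Target.py | nextGreatestLetter1
-- ===== SOURCE A (Python) =====
-- def nextGreatestLetter1(letters, target):
--     l=0
--     r=len(letters)-1
--     res=letters[0]
--     while(l<=r):
--         mid=(l+r)//2
--         if letters[mid]>target:
--             r=mid-1
--             res=letters[mid]
--         else:
--             l=mid+1
--     return res
-- ===== SOURCE B (Python) =====
-- def nextGreatestLetter1(letters, target):
--     for c in letters:
--         if c > target:
--             return c
--     return letters[0]
-- ===== Notes on version B (the rewrite author's own statement) =====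
-- stated objective: simpler
-- what changed: Replaces the hand-rolled binary search (l/r/mid/res loop) by a single linear scan that returns the first letter strictly greater than target, falling back to letters[0].
-- outside the precondition, e.g. on nextGreatestLetter1(['b', 'a', 'c'], 'a'): A returns 'c', B returns 'b'
import Mathlib
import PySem

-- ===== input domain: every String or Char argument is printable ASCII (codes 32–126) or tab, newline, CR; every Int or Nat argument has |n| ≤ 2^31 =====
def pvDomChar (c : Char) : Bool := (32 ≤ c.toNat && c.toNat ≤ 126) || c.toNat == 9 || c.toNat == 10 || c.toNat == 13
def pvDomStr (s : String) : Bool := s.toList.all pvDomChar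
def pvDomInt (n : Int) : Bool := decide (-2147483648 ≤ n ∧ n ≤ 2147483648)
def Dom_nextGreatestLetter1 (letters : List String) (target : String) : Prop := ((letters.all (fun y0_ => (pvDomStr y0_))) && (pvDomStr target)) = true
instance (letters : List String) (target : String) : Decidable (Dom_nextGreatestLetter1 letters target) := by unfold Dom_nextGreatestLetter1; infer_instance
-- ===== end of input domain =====

-- B replaces A's hand-rolled binary search by a simple linear scan for the first
-- letter strictly greater than target (falling back to letters[0]); equality is
-- proved on nonempty sorted input, the problem's stated domain.


-- ===== PORT A =====
-- the while-loop of A; letters[mid] is always in range (0 ≤ l ≤ mid ≤ r < length), so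
-- pyGetD is exact there; IndexError cannot occur inside the loop
def nextGLWhile (letters : List String) (target : String) (l r : Int) (res : String) : String :=
  if h : l ≤ r then
    let mid := PySem.Int.floordiv (l + r) 2
    if target < PySem.List.pyGetD letters mid "" then
      nextGLWhile letters target l (mid - 1) (PySem.List.pyGetD letters mid "")
    else nextGLWhile letters target (mid + 1) r res
  else res
termination_by (r + 1 - l).toNat
decreasing_by
  · have hb := PySem.Int.floordiv_two_mid_bounds h
    simp only [mid] at *
    omega
  · have hb := PySem.Int.floordiv_two_mid_bounds h
    simp only [mid] at *
    omega

-- letters[0] raises IndexError on the empty list (excluded by Pre_); ".getD" only totalises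
def nextGreatestLetter1 (letters : List String) (target : String) : String :=
  nextGLWhile letters target 0 ((letters.length : Int) - 1)
    (PySem.List.pyGetD letters 0 "")

-- ===== PORT B =====
-- the for-loop of B: first element strictly greater than target, if any
def nextGLScan (target : String) : List String → Option String
  | [] => none
  | c :: rest => if target < c then some c else nextGLScan target rest

-- letters[0] raises IndexError on the empty list (excluded by Pre_); ".getD" only totalises
def nextGreatestLetter1_alt (letters : List String) (target : String) : String :=
  match nextGLScan target letters with
  | some c => c
  | none => PySem.List.pyGetD letters 0 ""

-- ===== PRECONDITION & SPEC =====
-- Pre_ excludes the empty list, on which both programs raise IndexError, and those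
-- unsorted lists — outside the problem's stated domain ("sorted array") — on which the
-- order matters, i.e. lists that are neither sorted nor all ≤ target nor all > target;
-- there A's binary-search probes return an accidental element.
-- (order stated over .toList — the same order, String.le_iff_toList_le — so it is kernel-decidable)
def Pre_nextGreatestLetter1 (letters : List String) (target : String) : Prop :=
  letters ≠ [] ∧
    (letters.Pairwise (fun a b => a.toList ≤ b.toList) ∨
     (∀ c ∈ letters, c.toList ≤ target.toList) ∨
     (∀ c ∈ letters, target.toList < c.toList))
instance (letters : List String) (target : String) : Decidable (Pre_nextGreatestLetter1 letters target) := by unfold Pre_nextGreatestLetter1; infer_instance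

def pvWitness_nextGreatestLetter1 : List String × String := (["a", "c", "f", "j"], "c")

def Spec_nextGreatestLetter1 (letters : List String) (target : String) (out : String) : Prop := out = nextGreatestLetter1_alt letters target
instance (letters : List String) (target : String) (out : String) : Decidable (Spec_nextGreatestLetter1 letters target out) := by unfold Spec_nextGreatestLetter1; infer_instance

-- ===== CLAIM (what is proved, stated in full; the proofs are below) =====
def Claim_equal_nextGreatestLetter1 : Prop := ∀ (letters : List String) (target : String), Dom_nextGreatestLetter1 letters target → Pre_nextGreatestLetter1 letters target → Spec_nextGreatestLetter1 letters target (nextGreatestLetter1 letters target)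

-- ===== LEMMAS AND PROOFS =====

-- "first element at index ≥ k greater than target, else letters[0]" — B's value on a suffix
def fgf (letters : List String) (target : String) (k : Nat) : String :=
  match nextGLScan target (letters.drop k) with
  | some c => c
  | none => PySem.List.pyGetD letters 0 ""

lemma fgf_hit (letters : List String) (target : String) (k : Nat) (v : String)
    (hk : letters[k]? = some v) (hv : target < v) : fgf letters target k = v := by
  obtain ⟨hlt, hv'⟩ := List.getElem?_eq_some_iff.mp hk
  have hdrop : letters.drop k = v :: letters.drop (k + 1) := by
    rw [List.drop_eq_getElem_cons hlt, hv']
  simp [fgf, hdrop, nextGLScan, hv]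

lemma fgf_miss (letters : List String) (target : String) (k : Nat) (v : String)
    (hk : letters[k]? = some v) (hv : ¬ target < v) :
    fgf letters target k = fgf letters target (k + 1) := by
  obtain ⟨hlt, hv'⟩ := List.getElem?_eq_some_iff.mp hk
  have hdrop : letters.drop k = v :: letters.drop (k + 1) := by
    rw [List.drop_eq_getElem_cons hlt, hv']
  simp [fgf, hdrop, nextGLScan, hv]

-- in a ≤-sorted list, if letters[m] ≤ target then every prefix step up to m can be skipped
lemma fgf_skip (letters : List String) (target : String)
    (hsort : letters.Pairwise (· ≤ ·)) (m : Nat) (hm : m < letters.length)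
    (hle : ¬ target < letters[m]) :
    ∀ k, k ≤ m → fgf letters target k = fgf letters target (m + 1) := by
  intro k hk
  induction hord : m - k generalizing k with
  | zero =>
      have hkm : k = m := by omega
      subst hkm
      exact fgf_miss letters target k letters[k] (List.getElem?_eq_some_iff.mpr ⟨hm, rfl⟩) hle
  | succ n ih =>
      have hkm : k < m := by omega
      have hklt : k < letters.length := by omega
      have hle2 : letters[k] ≤ letters[m] :=
        List.pairwise_iff_getElem.mp hsort k m hklt hm hkm
      have hkv : ¬ target < letters[k] := fun hgt => hle (lt_of_lt_of_le hgt hle2)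
      rw [fgf_miss letters target k letters[k] (List.getElem?_eq_some_iff.mpr ⟨hklt, rfl⟩) hkv]
      exact ih (k + 1) (by omega) (by omega)

-- main loop invariant: res carries B's answer for the suffix past r
lemma nextGLWhile_eq (letters : List String) (target : String)
    (hsort : letters.Pairwise (· ≤ ·)) :
    ∀ (n : Nat) (l r : Int) (res : String),
      (r + 1 - l).toNat ≤ n →
      0 ≤ l → l ≤ r + 1 → r < (letters.length : Int) →
      res = fgf letters target (r + 1).toNat →
      nextGLWhile letters target l r res = fgf letters target l.toNat := by
  intro n
  induction n with
  | zero =>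
      intro l r res hn h0 hlr hr hres
      have : ¬ l ≤ r := by omega
      rw [nextGLWhile, dif_neg this, hres]
      congr 1
      omega
  | succ n ih =>
      intro l r res hn h0 hlr hr hres
      by_cases h : l ≤ r
      · have hb := PySem.Int.floordiv_two_mid_bounds h
        rw [nextGLWhile]
        simp only [dif_pos h]
        set mid := PySem.Int.floordiv (l + r) 2 with hmid
        have hmid0 : 0 ≤ mid := by omega
        have hmidlt : mid < (letters.length : Int) := by omega
        have hget : PySem.List.pyGetD letters mid "" = letters[mid.toNat] :=
          PySem.List.pyGetD_eq_getElem letters "" hmid0 hmidlt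
        rw [hget]
        have hidx : letters[mid.toNat]? = some letters[mid.toNat] :=
          List.getElem?_eq_some_iff.mpr ⟨by omega, rfl⟩
        by_cases hv : target < letters[mid.toNat]
        · rw [if_pos hv]
          apply ih l (mid - 1) _ (by omega) h0 (by omega) (by omega)
          have : (mid - 1 + 1).toNat = mid.toNat := by omega
          rw [this]
          exact (fgf_hit letters target mid.toNat _ hidx hv).symm
        · rw [if_neg hv]
          have h1 : nextGLWhile letters target (mid + 1) r res
              = fgf letters target (mid + 1).toNat := by
            apply ih (mid + 1) r res (by omega) (by omega) (by omega) hr hres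
          rw [h1]
          have hmn : (mid + 1).toNat = mid.toNat + 1 := by omega
          rw [hmn]
          exact (fgf_skip letters target hsort mid.toNat (by omega) hv l.toNat (by omega)).symm
      · have : ¬ l ≤ r := h
        rw [nextGLWhile, dif_neg this, hres]
        congr 1
        omega

-- the while-loop never changes res when every element is ≤ target
lemma nextGLWhile_all_le (letters : List String) (target : String)
    (hall : ∀ c ∈ letters, ¬ target < c) :
    ∀ (n : Nat) (l r : Int) (res : String),
      (r + 1 - l).toNat ≤ n → 0 ≤ l → r < (letters.length : Int) →
      nextGLWhile letters target l r res = res := by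
  intro n
  induction n with
  | zero =>
      intro l r res hn h0 hr
      rw [nextGLWhile, dif_neg (by omega)]
  | succ n ih =>
      intro l r res hn h0 hr
      by_cases h : l ≤ r
      · have hb := PySem.Int.floordiv_two_mid_bounds h
        rw [nextGLWhile]
        simp only [dif_pos h]
        set mid := PySem.Int.floordiv (l + r) 2 with hmid
        have hv : ¬ target < PySem.List.pyGetD letters mid "" :=
          hall _ (PySem.List.pyGetD_mem letters "" (by simp [PySem.Raise.InRange]; omega))
        rw [if_neg hv]
        exact ih (mid + 1) r res (by omega) (by omega) hr
      · rw [nextGLWhile, dif_neg h]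
-- the while-loop descends to index l when every element is > target
lemma nextGLWhile_all_gt (letters : List String) (target : String)
    (hall : ∀ c ∈ letters, target < c) :
    ∀ (n : Nat) (l r : Int) (res : String),
      (r + 1 - l).toNat ≤ n → 0 ≤ l → l ≤ r → r < (letters.length : Int) →
      nextGLWhile letters target l r res = PySem.List.pyGetD letters l "" := by
  intro n
  induction n with
  | zero => intro l r res hn h0 hl hr; omega
  | succ n ih =>
      intro l r res hn h0 hl hr
      have hb := PySem.Int.floordiv_two_mid_bounds hl
      rw [nextGLWhile]
      simp only [dif_pos hl]
      set mid := PySem.Int.floordiv (l + r) 2 with hmid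
      have hv : target < PySem.List.pyGetD letters mid "" :=
        hall _ (PySem.List.pyGetD_mem letters "" (by simp [PySem.Raise.InRange]; omega))
      rw [if_pos hv]
      by_cases hrec : l ≤ mid - 1
      · exact ih l (mid - 1) _ (by omega) h0 hrec (by omega)
      · have hml : mid = l := by omega
        rw [nextGLWhile, dif_neg (by omega), hml]
-- the scan returns none when every element is ≤ target
lemma nextGLScan_none (target : String) (xs : List String)
    (hall : ∀ c ∈ xs, ¬ target < c) : nextGLScan target xs = none := by
  induction xs with
  | nil => rfl
  | cons c rest ih =>
      rw [nextGLScan, if_neg (hall c (by simp))]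
      exact ih (fun d hd => hall d (by simp [hd]))

-- ===== VERDICT (by name: the statement is the Claim_ definition above) =====
theorem nextGreatestLetter1_spec : Claim_equal_nextGreatestLetter1 := by
  intro letters target _hdom hpre
  obtain ⟨hne, hcase⟩ := hpre
  have hlen : 0 < letters.length := List.length_pos_iff.mpr hne
  unfold Spec_nextGreatestLetter1 nextGreatestLetter1
  rcases hcase with hsort' | hle | hgt
  · have hsort : letters.Pairwise (· ≤ ·) :=
      hsort'.imp (fun h => String.le_iff_toList_le.mpr h)
    have h0 : PySem.List.pyGetD letters 0 ""
        = fgf letters target (((letters.length : Int) - 1) + 1).toNat := by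
      have : (((letters.length : Int) - 1) + 1).toNat = letters.length := by omega
      rw [this]
      simp [fgf, List.drop_length, nextGLScan]
    rw [nextGLWhile_eq letters target hsort letters.length 0 ((letters.length : Int) - 1) _
        (by omega) (by omega) (by omega) (by omega) h0]
    simp [fgf, nextGreatestLetter1_alt]
  · have hall : ∀ c ∈ letters, ¬ target < c := fun c hc =>
      not_lt.mpr (String.le_iff_toList_le.mpr (hle c hc))
    rw [nextGLWhile_all_le letters target hall letters.length _ _ _ (by omega) (by omega)
        (by omega)]
    rw [nextGreatestLetter1_alt, nextGLScan_none target letters hall]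
  · have hall : ∀ c ∈ letters, target < c := fun c hc =>
      String.lt_iff_toList_lt.mpr (hgt c hc)
    rw [nextGLWhile_all_gt letters target hall letters.length _ _ _ (by omega) (by omega)
        (by omega) (by omega)]
    obtain ⟨c, rest, hcr⟩ := List.exists_cons_of_ne_nil hne
    subst hcr
    rw [nextGreatestLetter1_alt, nextGLScan, if_pos (hall c (by simp))]
    simp [PySem.List.pyGetD_zero_cons]
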